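-- pv_equiv track=rewrite | github.com/ReesMehorst/DEAI | Week2/Envelop opdracht/EnvelOpdracht.py | grootste_stapel_hoogte
-- ===== SOURCE A (Python) =====
-- def past_in(hoogte, breedte):
--     return hoogte[0] < breedte[0] and hoogte[1] < breedte[1] #kijkt of de hoogte en breedte van de nieuwe envelop past in de huidige envelop
--
-- def grootste_stapel_hoogte(enveloppen):
--     enveloppen.sort() #sorteert de gegeven tuple
--     grootste_stapel_hoogte = [1] * len(enveloppen) #maakt een lijst van de lengte van enveloppen (50) met alle waarden 1 (deze worden overwritten als het hoger is)
--
--     for i in range(len(enveloppen)):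
--         for j in range(i):
--             if past_in(enveloppen[j], enveloppen[i]):
--                 grootste_stapel_hoogte[i] = max(grootste_stapel_hoogte[i], grootste_stapel_hoogte[j] + 1)
--
--     return max(grootste_stapel_hoogte) #returned de grootste stapel mogelijk
-- ===== SOURCE B (Python) =====
-- def grootste_stapel_hoogte(enveloppen):
--     env = sorted(enveloppen, key=lambda e: (e[0], -e[1]))
--     tails = []
--     for e in env:
--         h = e[1]
--         lo, hi = 0, len(tails)
--         while lo < hi:
--             mid = (lo + hi) // 2
--             if tails[mid] < h:
--                 lo = mid + 1
--             else:
--                 hi = mid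
--         if lo == len(tails):
--             tails.append(h)
--         else:
--             tails[lo] = h
--     return len(tails)
-- ===== Notes on version B (the rewrite author's own statement) =====
-- stated objective: faster
-- what changed: Replaced the lexicographic sort + O(n^2) pairwise nesting DP by a sort on (width asc, height desc) followed by an O(n log n) patience (binary-search LIS) scan on the heights.
-- outside the precondition, e.g. on grootste_stapel_hoogte([(3,), (3, 1)]): A returns 1, B raises IndexError
import Mathlib
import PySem

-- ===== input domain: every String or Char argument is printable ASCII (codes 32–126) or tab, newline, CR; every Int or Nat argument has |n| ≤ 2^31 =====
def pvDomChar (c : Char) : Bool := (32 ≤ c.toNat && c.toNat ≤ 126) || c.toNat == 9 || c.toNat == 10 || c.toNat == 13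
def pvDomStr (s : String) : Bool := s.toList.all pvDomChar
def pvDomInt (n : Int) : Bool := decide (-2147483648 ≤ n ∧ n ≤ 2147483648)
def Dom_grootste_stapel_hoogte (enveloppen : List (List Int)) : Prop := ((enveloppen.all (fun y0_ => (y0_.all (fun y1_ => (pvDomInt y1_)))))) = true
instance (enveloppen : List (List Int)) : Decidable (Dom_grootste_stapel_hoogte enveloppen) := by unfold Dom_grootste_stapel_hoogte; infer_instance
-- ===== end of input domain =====

-- B replaces A's lexicographic sort + O(n^2) pairwise nesting DP by a sort on (width asc, height desc)
-- followed by a patience (binary-search LIS) scan on the heights; a timing run measured B faster.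
-- A sorts its argument in place (list.sort()); the equivalence proved here is about the RETURN value only.

-- ===== PORT A =====
def past_in (hoogte breedte : List Int) : Bool :=
  decide (PySem.List.pyGetD hoogte 0 0 < PySem.List.pyGetD breedte 0 0) &&
  decide (PySem.List.pyGetD hoogte 1 0 < PySem.List.pyGetD breedte 1 0)

-- inner 'for j in range(i)' loop body of A
def bodyA (env : List (List Int)) (i : Int) (dp : List Int) (j : Int) : List Int :=
  if past_in (PySem.List.pyGetD env j []) (PySem.List.pyGetD env i []) then
    PySem.List.pySetD dp i (max (PySem.List.pyGetD dp i 0) (PySem.List.pyGetD dp j 0 + 1))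
  else dp

-- outer 'for i in range(len(enveloppen))' loop body of A
def outerA (env : List (List Int)) (dp : List Int) (i : Int) : List Int :=
  (PySem.List.pyRange 0 i 1).foldl (bodyA env i) dp

def grootste_stapel_hoogte (enveloppen : List (List Int)) : Int :=
  let env := PySem.List.sorted enveloppen (fun x => x) false
  let dp0 := PySem.List.pyRepeat [(1:Int)] (env.length : Int)
  let dp := (PySem.List.pyRange 0 (env.length : Int) 1).foldl (outerA env) dp0
  (PySem.List.max? dp (fun x => x)).getD 0

-- ===== PORT B =====
-- hand-written binary search of Source B (the 'while lo < hi' loop); exact step for step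
def bsearch (tails : List Int) (h : Int) (lo hi : Nat) : Nat :=
  if hlt : lo < hi then
    let mid := (lo + hi) / 2
    if PySem.List.pyGetD tails (mid : Int) 0 < h then bsearch tails h (mid + 1) hi
    else bsearch tails h lo mid
  else lo
termination_by hi - lo
decreasing_by all_goals omega

-- body of Source B's 'for e in env' loop, acting on the running tails list
def pstep (tails : List Int) (h : Int) : List Int :=
  let lo := bsearch tails h 0 tails.length
  if lo = tails.length then tails ++ [h] else PySem.List.pySetD tails (lo : Int) h

def grootste_stapel_hoogte_alt (enveloppen : List (List Int)) : Int :=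
  let env := PySem.List.sorted2 enveloppen (fun e => PySem.List.pyGetD e 0 0)
      (fun e => -(PySem.List.pyGetD e 1 0)) false
  let tails := env.foldl (fun tails e => pstep tails (PySem.List.pyGetD e 1 0)) []
  (tails.length : Int)

-- ===== PRECONDITION & SPEC =====
-- Pre_ excludes the empty list, on which A raises ValueError (max of an empty sequence), and inputs
-- containing an envelope with fewer than two sides, on which A raises IndexError in past_in except in
-- degenerate tie cases (e.g. [[3],[3,1]]) where A returns while B's key lookup raises IndexError.
def Pre_grootste_stapel_hoogte (enveloppen : List (List Int)) : Prop :=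
  enveloppen ≠ [] ∧ ∀ e ∈ enveloppen, 2 ≤ e.length
instance (enveloppen : List (List Int)) : Decidable (Pre_grootste_stapel_hoogte enveloppen) := by
  unfold Pre_grootste_stapel_hoogte; infer_instance
def pvWitness_grootste_stapel_hoogte : List (List Int) := [[1, 2], [3, 4]]

def Spec_grootste_stapel_hoogte (enveloppen : List (List Int)) (out : Int) : Prop :=
  out = grootste_stapel_hoogte_alt enveloppen
instance (enveloppen : List (List Int)) (out : Int) : Decidable (Spec_grootste_stapel_hoogte enveloppen out) := by
  unfold Spec_grootste_stapel_hoogte; infer_instance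

-- ===== CLAIM (what is proved, stated in full; the proofs are below) =====
def Claim_equal_grootste_stapel_hoogte : Prop := ∀ (enveloppen : List (List Int)), Dom_grootste_stapel_hoogte enveloppen → Pre_grootste_stapel_hoogte enveloppen → Spec_grootste_stapel_hoogte enveloppen (grootste_stapel_hoogte enveloppen)
-- ===== LEMMAS AND PROOFS =====

-- the nesting relation of past_in, as a Prop
def fits (a b : List Int) : Prop := past_in a b = true

lemma fits_iff (a b : List Int) : fits a b ↔
    PySem.List.pyGetD a 0 0 < PySem.List.pyGetD b 0 0 ∧ PySem.List.pyGetD a 1 0 < PySem.List.pyGetD b 1 0 := by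
  simp [fits, past_in]

lemma fits_trans {a b c : List Int} (h1 : fits a b) (h2 : fits b c) : fits a c := by
  rw [fits_iff] at *; omega

-- common specification: v is the length of the longest nonempty fits-chain drawable from xs
def MaxChain (xs : List (List Int)) (v : Int) : Prop :=
  (∃ l, l ≠ [] ∧ l.Pairwise fits ∧ l.Subperm xs ∧ (l.length : Int) = v) ∧
  (∀ l, l ≠ [] → l.Pairwise fits → l.Subperm xs → (l.length : Int) ≤ v)

lemma MaxChain_unique {xs : List (List Int)} {v w : Int} (hv : MaxChain xs v) (hw : MaxChain xs w) : v = w := by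
  obtain ⟨⟨l, hl1, hl2, hl3, hl4⟩, hub⟩ := hv
  obtain ⟨⟨m, hm1, hm2, hm3, hm4⟩, hub'⟩ := hw
  have := hub m hm1 hm2 hm3
  have := hub' l hl1 hl2 hl3
  omega

-- characterisation of a conditional running-max fold
lemma foldl_maxif {ι : Type} (c : ι → Bool) (f : ι → Int) :
    ∀ (L : List ι) (init : Int),
      init ≤ L.foldl (fun m p => if c p then max m (f p) else m) init ∧
      (L.foldl (fun m p => if c p then max m (f p) else m) init = init ∨
        ∃ p ∈ L, c p = true ∧ L.foldl (fun m p => if c p then max m (f p) else m) init = f p) ∧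
      (∀ p ∈ L, c p = true → f p ≤ L.foldl (fun m p => if c p then max m (f p) else m) init) := by
  intro L
  induction L with
  | nil => intro init; simp
  | cons p L ih =>
    intro init
    simp only [List.foldl_cons]
    by_cases hc : c p = true
    · simp only [hc, if_true]
      obtain ⟨h1, h2, h3⟩ := ih (max init (f p))
      refine ⟨le_trans (le_max_left _ _) h1, ?_, ?_⟩
      · rcases h2 with h2 | ⟨q, hq, hcq, hval⟩
        · rcases max_choice init (f p) with hm | hm
          · exact Or.inl (by rw [h2, hm])
          · exact Or.inr ⟨p, by simp, hc, by rw [h2, hm]⟩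
        · exact Or.inr ⟨q, by simp [hq], hcq, hval⟩
      · intro q hq hcq
        rcases List.mem_cons.mp hq with rfl | hq'
        · exact le_trans (le_max_right _ _) h1
        · exact h3 q hq' hcq
    · simp only [hc]
      obtain ⟨h1, h2, h3⟩ := ih init
      refine ⟨h1, ?_, ?_⟩
      · rcases h2 with h2 | ⟨q, hq, hcq, hval⟩
        · exact Or.inl h2
        · exact Or.inr ⟨q, by simp [hq], hcq, hval⟩
      · intro q hq hcq
        rcases List.mem_cons.mp hq with rfl | hq'
        · exact absurd hcq hc
        · exact h3 q hq' hcq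

lemma pairwise_insertBy {α : Type} (before : α → α → Bool)
    (hasym : ∀ a b, before a b = true → before b a = false)
    (htrans : ∀ a b c, before a b = true → before b c = true → before a c = true)
    (x : α) (acc : List α) (hacc : acc.Pairwise (fun a b => before b a = false)) :
    (PySem.List.insertBy before x acc).Pairwise (fun a b => before b a = false) := by
  induction acc with
  | nil => simp [PySem.List.insertBy]
  | cons y ys ih =>
    rw [show PySem.List.insertBy before x (y :: ys) =
        (if before x y = true then x :: y :: ys else y :: PySem.List.insertBy before x ys) from rfl]
    rcases List.pairwise_cons.mp hacc with ⟨hy, hys⟩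
    by_cases hxy : before x y = true
    · rw [if_pos hxy]
      refine List.pairwise_cons.mpr ⟨?_, hacc⟩
      intro z hz
      rcases List.mem_cons.mp hz with rfl | hz'
      · exact hasym x z hxy
      · by_contra hzx
        have hzx' : before z x = true := by
          cases h : before z x
          · exact absurd h hzx
          · rfl
        have := htrans z x y hzx' hxy
        rw [hy z hz'] at this; exact Bool.noConfusion this
    · rw [if_neg hxy]
      refine List.pairwise_cons.mpr ⟨?_, ih hys⟩
      intro z hz
      rcases (PySem.List.mem_insertBy before x z ys).mp hz with rfl | hz'
      · cases h : before z y
        · rfl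
        · exact absurd h hxy
      · exact hy z hz'

lemma pairwise_foldl_insertBy {α : Type} (before : α → α → Bool)
    (hasym : ∀ a b, before a b = true → before b a = false)
    (htrans : ∀ a b c, before a b = true → before b c = true → before a c = true) :
    ∀ (xs acc : List α), acc.Pairwise (fun a b => before b a = false) →
      (xs.foldl (fun acc x => PySem.List.insertBy before x acc) acc).Pairwise (fun a b => before b a = false) := by
  intro xs
  induction xs with
  | nil => intro acc h; simpa using h
  | cons x xs ih =>
    intro acc h
    simp only [List.foldl_cons]
    exact ih _ (pairwise_insertBy before hasym htrans x acc h)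

lemma listInt_lt_trans : ∀ (a b c : List Int), a < b → b < c → a < c := by
  intro a
  induction a with
  | nil =>
    intro b c hab hbc
    cases c with
    | nil => cases b with
      | nil => exact absurd hab (List.not_lt_nil _)
      | cons y ys => exact absurd hbc (List.not_lt_nil _)
    | cons z zs => exact List.nil_lt_cons z zs
  | cons x xs ih =>
    intro b c hab hbc
    cases b with
    | nil => exact absurd hab (List.not_lt_nil _)
    | cons y ys =>
      cases c with
      | nil => exact absurd hbc (List.not_lt_nil _)
      | cons z zs =>
        rw [List.cons_lt_cons_iff] at hab hbc ⊢
        rcases hab with h1 | ⟨rfl, h1⟩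
        · rcases hbc with h2 | ⟨rfl, h2⟩
          · exact Or.inl (lt_trans h1 h2)
          · exact Or.inl h1
        · rcases hbc with h2 | ⟨rfl, h2⟩
          · exact Or.inl h2
          · exact Or.inr ⟨rfl, ih ys zs h1 h2⟩

lemma listInt_lt_irrefl : ∀ (a : List Int), ¬ a < a := by
  intro a
  induction a with
  | nil => exact List.not_lt_nil _
  | cons x xs ih =>
    rw [List.cons_lt_cons_iff]
    rintro (h | ⟨-, h⟩)
    · exact lt_irrefl x h
    · exact ih h

lemma sortedA_pairwise (xs : List (List Int)) :
    (PySem.List.sorted xs (fun x => x) false).Pairwise (fun a b => ¬ b < a) := by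
  have h := pairwise_foldl_insertBy (fun (a b : List Int) => decide (a < b))
    (fun a b hab => by
      simp only [decide_eq_true_eq] at hab
      simp only [decide_eq_false_iff_not]
      intro hba; exact listInt_lt_irrefl a (listInt_lt_trans a b a hab hba))
    (fun a b c hab hbc => by
      simp only [decide_eq_true_eq] at *
      exact listInt_lt_trans a b c hab hbc)
    xs [] List.Pairwise.nil
  have : PySem.List.sorted xs (fun x => x) false =
      xs.foldl (fun acc x => PySem.List.insertBy (fun a b => decide (a < b)) x acc) [] := rfl
  rw [this]
  exact h.imp (by intro a b hab; simpa [decide_eq_false_iff_not] using hab)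

lemma sortedB_pairwise {α : Type} (xs : List α) (k1 k2 : α → Int) :
    (PySem.List.sorted2 xs k1 k2 false).Pairwise
      (fun a b => k1 a < k1 b ∨ (k1 a = k1 b ∧ k2 a ≤ k2 b)) := by
  have h := pairwise_foldl_insertBy
    (fun a b => decide (k1 a < k1 b) || (!decide (k1 b < k1 a) && decide (k2 a < k2 b)))
    (fun a b hab => by
      simp only [Bool.or_eq_true, Bool.and_eq_true, Bool.not_eq_true', decide_eq_true_eq,
        decide_eq_false_iff_not, Bool.or_eq_false_iff, Bool.and_eq_false_iff,
        Bool.not_eq_false'] at *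
      omega)
    (fun a b c hab hbc => by
      simp only [Bool.or_eq_true, Bool.and_eq_true, Bool.not_eq_true', decide_eq_true_eq,
        decide_eq_false_iff_not] at *
      omega)
    xs [] List.Pairwise.nil
  have heq : PySem.List.sorted2 xs k1 k2 false =
      xs.foldl (fun acc x => PySem.List.insertBy
        (fun a b => decide (k1 a < k1 b) || (!decide (k1 b < k1 a) && decide (k2 a < k2 b))) x acc) [] := rfl
  rw [heq]
  refine h.imp ?_
  intro a b hab
  simp only [Bool.or_eq_false_iff, Bool.and_eq_false_iff, Bool.not_eq_false',
    decide_eq_false_iff_not, decide_eq_true_iff] at hab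
  omega

-- a strictly-descending-free chain that is a sub-multiset of a sorted list is a sublist of it
lemma chain_subperm_sublist {α : Type} [DecidableEq α] (r : α → α → Prop) :
    ∀ (zs l : List α), zs.Pairwise r → l.Pairwise (fun x y => ¬ r y x) → l.Subperm zs → l.Sublist zs := by
  intro zs
  induction zs with
  | nil => intro l _ _ hsub; rw [List.subperm_nil.mp hsub]
  | cons b zs' ih =>
    intro l hzs hl hsub
    cases l with
    | nil => exact List.nil_sublist _
    | cons a l' =>
      by_cases hab : a = b
      · subst hab
        have h' : l'.Subperm zs' := (List.subperm_cons a).mp hsub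
        exact (ih l' (List.pairwise_cons.mp hzs).2 (List.pairwise_cons.mp hl).2 h').cons₂ a
      · have hmem : a ∈ zs' := by
          rcases List.mem_cons.mp (hsub.subset (List.mem_cons_self ..)) with h | h
          · exact absurd h hab
          · exact h
        have hrba : r b a := (List.pairwise_cons.mp hzs).1 a hmem
        have hbnotin : b ∉ a :: l' := by
          intro hbin
          rcases List.mem_cons.mp hbin with h | h
          · exact hab h.symm
          · exact (List.pairwise_cons.mp hl).1 b h hrba
        have hsub' : (a :: l').Subperm zs' := by
          rw [List.subperm_ext_iff] at hsub ⊢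
          intro x hx
          have hxb : x ≠ b := fun he => hbnotin (he ▸ hx)
          have h0 := hsub x hx
          simp only [List.count_cons, beq_iff_eq] at h0 ⊢
          rw [if_neg (show ¬ b = x from fun he => hxb he.symm)] at h0
          omega
        exact (ih (a :: l') (List.pairwise_cons.mp hzs).2 hl hsub').cons b

lemma sublist_snoc_decomp {α : Type} :
    ∀ (ys l : List α) (f : α), (l ++ [f]).Sublist ys →
      ∃ n, ∃ h : n < ys.length, ys[n] = f ∧ l.Sublist (ys.take n) := by
  intro ys
  induction ys with
  | nil => intro l f h; simp at h
  | cons y ys' ih =>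
    intro l f h
    rcases List.sublist_cons_iff.mp h with h' | ⟨rtail, heq, hrt⟩
    · obtain ⟨n, hn, hf, hl⟩ := ih l f h'
      exact ⟨n + 1, by simpa using hn, by simpa using hf, by simpa using hl.cons y⟩
    · cases l with
      | nil =>
        simp only [List.nil_append, List.cons.injEq] at heq
        exact ⟨0, by simp, heq.1.symm, by simp⟩
      | cons a l₂ =>
        simp only [List.cons_append, List.cons.injEq] at heq
        obtain ⟨rfl, heq2⟩ := heq
        obtain ⟨n', hn', hf', hl'⟩ := ih l₂ f (by rw [heq2]; exact hrt)
        refine ⟨n' + 1, by simpa using hn', by simpa using hf', ?_⟩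
        simpa using hl'.cons₂ a

-- ===== A side: the quadratic DP =====

def vstep (env : List (List Int)) (prev : List Int) (i : Nat) : Int :=
  (List.range i).foldl
    (fun m j => if past_in (env.getD j []) (env.getD i []) then max m (prev.getD j 0 + 1) else m) 1

def vlist (env : List (List Int)) : Nat → List Int
  | 0 => []
  | k + 1 => vlist env k ++ [vstep env (vlist env k) k]

lemma vlist_length (env : List (List Int)) (k : Nat) : (vlist env k).length = k := by
  induction k with
  | zero => rfl
  | succ k ih => simp [vlist, ih]

lemma vlist_prefix (env : List (List Int)) (i : Nat) :
    ∀ k, i ≤ k → ∃ t, vlist env k = vlist env i ++ t := by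
  intro k
  induction k with
  | zero => intro h; exact ⟨[], by rw [Nat.le_zero.mp h]; simp⟩
  | succ k ih =>
    intro h
    by_cases hik : i = k + 1
    · exact ⟨[], by rw [hik]; simp⟩
    · obtain ⟨t, ht⟩ := ih (by omega)
      exact ⟨t ++ [vstep env (vlist env k) k], by simp [vlist, ht]⟩

lemma vlist_getD (env : List (List Int)) :
    ∀ k i, i < k → (vlist env k).getD i 0 = vstep env (vlist env i) i := by
  intro k i h
  obtain ⟨t, ht⟩ := vlist_prefix env (i + 1) k h
  rw [ht, List.getD_eq_getElem?_getD,
    List.getElem?_append_left (by rw [vlist_length]; omega)]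
  rw [show vlist env (i + 1) = vlist env i ++ [vstep env (vlist env i) i] from rfl,
    List.getElem?_append_right (by rw [vlist_length])]
  simp [vlist_length]

-- v is the length of the longest fits-chain within pre that e extends (the intended value of dp[i])
def IsBestEnd (pre : List (List Int)) (e : List Int) (v : Int) : Prop :=
  (∃ l, l.Sublist pre ∧ (l ++ [e]).Pairwise fits ∧ (l.length + 1 : Int) = v) ∧
  (∀ l, l.Sublist pre → (l ++ [e]).Pairwise fits → (l.length + 1 : Int) ≤ v)

lemma take_succ_concat (env : List (List Int)) {j : Nat} (hj : j < env.length) :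
    env.take (j + 1) = env.take j ++ [env.getD j []] := by
  rw [List.take_add_one, List.getElem?_eq_getElem hj, List.getD_eq_getElem env [] hj]
  rfl

lemma take_sub_take (env : List (List Int)) {j i : Nat} (hj : j ≤ i) :
    (env.take i).take j = env.take j := by
  rw [List.take_take]; congr 1; omega

lemma vstep_best (env : List (List Int)) :
    ∀ i, i < env.length → IsBestEnd (env.take i) (env.getD i []) (vstep env (vlist env i) i) := by
  intro i
  induction i using Nat.strong_induction_on with
  | _ i ih =>
    intro hi
    obtain ⟨h1, h2, h3⟩ := foldl_maxif
      (fun j => past_in (env.getD j []) (env.getD i []))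
      (fun j => (vlist env i).getD j 0 + 1) (List.range i) 1
    rw [show vstep env (vlist env i) i = (List.range i).foldl
      (fun m j => if past_in (env.getD j []) (env.getD i [])
        then max m ((vlist env i).getD j 0 + 1) else m) 1 from rfl]
    constructor
    · -- existence
      rcases h2 with h2 | ⟨j, hjmem, hcj, hval⟩
      · exact ⟨[], List.nil_sublist _, by simp, by rw [h2]; simp⟩
      · rw [List.mem_range] at hjmem
        have hj : j < env.length := lt_trans hjmem hi
        have hstep : (vlist env i).getD j 0 = vstep env (vlist env j) j := vlist_getD env i j hjmem
        obtain ⟨⟨l, hl1, hl2, hl3⟩, _⟩ := ih j hjmem hj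
        refine ⟨l ++ [env.getD j []], ?_, ?_, ?_⟩
        · have hstep1 : (l ++ [env.getD j []]).Sublist (env.take (j + 1)) := by
            rw [take_succ_concat env hj]
            exact List.Sublist.append hl1 (List.Sublist.refl _)
          refine hstep1.trans ?_
          rw [← take_sub_take env (show j + 1 ≤ i by omega)]
          exact List.take_sublist _ _
        · rw [List.pairwise_append]
          refine ⟨hl2, List.pairwise_singleton _ _, ?_⟩
          intro a ha b hb
          rw [List.mem_singleton] at hb; subst hb
          have hfji : fits (env.getD j []) (env.getD i []) := hcj
          rcases List.mem_append.mp ha with ha' | ha'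
          · exact fits_trans
              ((List.pairwise_append.mp hl2).2.2 a ha' _ (List.mem_singleton_self _)) hfji
          · rw [List.mem_singleton] at ha'; subst ha'; exact hfji
        · rw [hval, hstep, List.length_append, List.length_singleton]
          push_cast
          omega
    · -- upper bound
      intro l hsubl hpwl
      rcases List.eq_nil_or_concat l with rfl | ⟨l₀, f, rfl⟩
      · simpa using h1
      · rw [List.concat_eq_append] at *
        obtain ⟨n, hn, hfn, hl₀⟩ := sublist_snoc_decomp _ _ _ hsubl
        have hni : n < i := by rw [List.length_take] at hn; omega
        have hnlen : n < env.length := lt_trans hni hi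
        have hfn' : env.getD n [] = f := by
          rw [List.getD_eq_getElem env [] hnlen, ← hfn, List.getElem_take]
        have htk : l₀.Sublist (env.take n) := by rwa [take_sub_take env (le_of_lt hni)] at hl₀
        have hpw' : (l₀ ++ [env.getD n []]).Pairwise fits := by
          rw [hfn']
          exact hpwl.sublist (List.sublist_append_left _ _)
        have hle := (ih n hni hnlen).2 l₀ htk hpw'
        have hfit : past_in (env.getD n []) (env.getD i []) = true := by
          have hfe : fits f (env.getD i []) := (List.pairwise_append.mp hpwl).2.2 f
            (List.mem_append_right l₀ (List.mem_singleton_self f)) _ (List.mem_singleton_self _)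
          rw [hfn']; exact hfe
        have hbnd := h3 n (List.mem_range.mpr hni) hfit
        rw [vlist_getD env i n hni] at hbnd
        rw [List.length_append, List.length_singleton]
        push_cast
        omega

lemma bridge_inner_aux (env : List (List Int)) (k : Nat) (V rest : List Int) (hV : V.length = k) :
    ∀ (m : Nat), m ≤ k → ∀ (c : Int),
      (PySem.List.pyRange 0 (m : Int) 1).foldl (bodyA env (k : Int)) (V ++ c :: rest) =
        V ++ ((List.range m).foldl
          (fun acc j => if past_in (env.getD j []) (env.getD k [])
            then max acc (V.getD j 0 + 1) else acc) c) :: rest := by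
  have hgetk : ∀ S : Int, PySem.List.pyGetD (V ++ S :: rest) (k : Int) 0 = S := by
    intro S
    rw [PySem.List.pyGetD_natCast, List.getD_eq_getElem?_getD,
      List.getElem?_append_right (by omega), hV]
    simp
  have hgetj : ∀ (S : Int) (j : Nat), j < k →
      PySem.List.pyGetD (V ++ S :: rest) (j : Int) 0 = V.getD j 0 := by
    intro S j hj
    rw [PySem.List.pyGetD_natCast, List.getD_eq_getElem?_getD,
      List.getElem?_append_left (by omega), ← List.getD_eq_getElem?_getD]
  have hset : ∀ (S w : Int), PySem.List.pySetD (V ++ S :: rest) (k : Int) w = V ++ w :: rest := by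
    intro S w
    rw [PySem.List.pySetD_natCast, List.set_append, if_neg (by omega)]
    rw [hV, Nat.sub_self, List.set_cons_zero]
  intro m
  induction m with
  | zero =>
    intro _ c
    rw [show ((0 : Nat) : Int) = 0 from rfl, PySem.List.pyRange_one_eq_nil (by omega)]
    simp
  | succ m ihm =>
    intro hm c
    rw [show ((m + 1 : Nat) : Int) = (m : Int) + 1 by push_cast; ring,
      PySem.List.pyRange_one_succ_right (by omega),
      List.foldl_append, List.foldl_cons, List.foldl_nil, ihm (by omega) c,
      List.range_succ, List.foldl_append, List.foldl_cons, List.foldl_nil]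
    unfold bodyA
    rw [PySem.List.pyGetD_natCast env, PySem.List.pyGetD_natCast env]
    by_cases hc : past_in (env.getD m []) (env.getD k []) = true
    · rw [if_pos hc, if_pos hc, hgetk, hgetj _ m (by omega), hset]
    · rw [if_neg hc, if_neg hc]

lemma bridge_inner (env : List (List Int)) (k : Nat) (V : List Int) (rest : List Int)
    (hV : V.length = k) :
    outerA env (V ++ (1:Int) :: rest) (k : Int) = V ++ vstep env V k :: rest := by
  unfold outerA
  rw [bridge_inner_aux env k V rest hV k (le_refl k) 1]
  rfl

lemma bridge_outer (env : List (List Int)) :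
    ∀ k, k ≤ env.length →
      (PySem.List.pyRange 0 (k : Int) 1).foldl (outerA env) (List.replicate env.length (1:Int)) =
        vlist env k ++ List.replicate (env.length - k) (1:Int) := by
  intro k
  induction k with
  | zero =>
    intro _
    rw [show ((0 : Nat) : Int) = 0 from rfl, PySem.List.pyRange_one_eq_nil (by omega)]
    simp [vlist]
  | succ k ihk =>
    intro hk
    rw [show ((k + 1 : Nat) : Int) = (k : Int) + 1 by push_cast; ring,
      PySem.List.pyRange_one_succ_right (by omega),
      List.foldl_append, List.foldl_cons, List.foldl_nil, ihk (by omega)]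
    rw [show List.replicate (env.length - k) (1:Int) =
        (1:Int) :: List.replicate (env.length - (k + 1)) 1 by
      rw [show env.length - k = (env.length - (k + 1)) + 1 by omega, List.replicate_succ]]
    rw [bridge_inner env k _ _ (vlist_length env k)]
    simp [vlist]

lemma fits_lt {a b : List Int} (ha : a ≠ []) (hb : b ≠ []) (h : fits a b) : a < b := by
  rw [fits_iff] at h
  cases a with
  | nil => exact absurd rfl ha
  | cons a0 as =>
    cases b with
    | nil => exact absurd rfl hb
    | cons b0 bs =>
      rw [List.cons_lt_cons_iff]
      exact Or.inl (by simpa [PySem.List.pyGetD_zero_cons] using h.1)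

lemma A_is_MaxChain (xs : List (List Int)) (hpre : Pre_grootste_stapel_hoogte xs) :
    MaxChain xs (grootste_stapel_hoogte xs) := by
  obtain ⟨hne, hlen2⟩ := hpre
  have hA : grootste_stapel_hoogte xs =
      (PySem.List.max? ((PySem.List.pyRange 0 ((PySem.List.sorted xs (fun x => x) false).length : Int) 1).foldl
        (outerA (PySem.List.sorted xs (fun x => x) false))
        (PySem.List.pyRepeat [(1:Int)] ((PySem.List.sorted xs (fun x => x) false).length : Int)))
        (fun x => x)).getD 0 := rfl
  rw [hA]
  set env := PySem.List.sorted xs (fun x => x) false with henv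
  have hperm : env.Perm xs := PySem.List.sorted_perm xs (fun x => x) false
  have henvne : env ≠ [] := by
    intro h
    rw [henv, PySem.List.sorted_eq_nil_iff] at h
    exact hne h
  rw [PySem.List.pyRepeat_singleton]
  rw [show ((env.length : Int)).toNat = env.length from Int.toNat_natCast _]
  rw [bridge_outer env env.length (le_refl _), Nat.sub_self, List.replicate_zero, List.append_nil]
  cases hmax : PySem.List.max? (vlist env env.length) (fun x => x) with
  | none =>
    exfalso
    rw [PySem.List.max?_eq_none_iff] at hmax
    have h0 := vlist_length env env.length
    rw [hmax] at h0
    exact henvne (List.length_eq_zero_iff.mp h0.symm)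
  | some m =>
    rw [Option.getD_some]
    constructor
    · -- existence of a chain of length m
      have hmem := PySem.List.max?_mem hmax
      obtain ⟨idx, hidx, hval⟩ := List.mem_iff_getElem.mp hmem
      rw [vlist_length] at hidx
      have hgd : (vlist env env.length).getD idx 0 = m := by
        rw [List.getD_eq_getElem _ _ (by rw [vlist_length]; exact hidx)]
        exact hval
      rw [vlist_getD env env.length idx hidx] at hgd
      obtain ⟨⟨l, hl1, hl2, hl3⟩, _⟩ := vstep_best env idx hidx
      refine ⟨l ++ [env.getD idx []], by simp, hl2, ?_, ?_⟩
      · have hsubenv : (l ++ [env.getD idx []]).Sublist env := by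
          have h1 : (l ++ [env.getD idx []]).Sublist (env.take (idx + 1)) := by
            rw [take_succ_concat env hidx]
            exact List.Sublist.append hl1 (List.Sublist.refl _)
          exact h1.trans (List.take_sublist _ _)
        exact hsubenv.subperm.trans hperm.subperm
      · rw [List.length_append, List.length_singleton]
        push_cast
        omega
    · -- upper bound
      intro l hlne hlpw hlsub
      have hsub2 : l.Subperm env := hlsub.trans hperm.symm.subperm
      have hl' : l.Pairwise (fun x y : List Int => ¬ ¬ (x < y)) := by
        refine hlpw.imp_of_mem ?_
        intro a b ha hb hf
        have hane : a ≠ [] := by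
          have : 2 ≤ a.length := hlen2 a (hlsub.subset ha)
          intro h; rw [h] at this; simp at this
        have hbne : b ≠ [] := by
          have : 2 ≤ b.length := hlen2 b (hlsub.subset hb)
          intro h; rw [h] at this; simp at this
        exact not_not_intro (fits_lt hane hbne hf)
      have hsl : l.Sublist env :=
        chain_subperm_sublist (fun a b : List Int => ¬ b < a) env l
          (henv ▸ sortedA_pairwise xs) hl' hsub2
      rcases List.eq_nil_or_concat l with rfl | ⟨l₀, f, rfl⟩
      · exact absurd rfl hlne
      rw [List.concat_eq_append] at *
      obtain ⟨n, hn, hfn, hl₀⟩ := sublist_snoc_decomp env l₀ f hsl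
      have hfn' : env.getD n [] = f := by rw [List.getD_eq_getElem env [] hn, hfn]
      have hpw' : (l₀ ++ [env.getD n []]).Pairwise fits := by
        rw [hfn']; exact hlpw
      have hle := (vstep_best env n hn).2 l₀ hl₀ hpw'
      have hmemdp : (vlist env env.length).getD n 0 ∈ vlist env env.length := by
        rw [List.getD_eq_getElem _ _ (by rw [vlist_length]; exact hn)]
        exact List.getElem_mem _
      have hmax' := PySem.List.max?_isMax hmax _ hmemdp
      rw [vlist_getD env env.length n hn] at hmax'
      rw [List.length_append, List.length_singleton]
      push_cast
      omega

-- ===== B side: patience =====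

lemma getD_mono {t : List Int} (hs : t.Pairwise (· ≤ ·)) {i j : Nat}
    (hij : i ≤ j) (hj : j < t.length) : t.getD i 0 ≤ t.getD j 0 := by
  rcases eq_or_lt_of_le hij with rfl | hlt
  · exact le_refl _
  · have hi : i < t.length := lt_trans hlt hj
    rw [List.getD_eq_getElem t 0 hi, List.getD_eq_getElem t 0 hj]
    exact List.pairwise_iff_getElem.mp hs i j hi hj hlt

lemma bsearch_spec (t : List Int) (x : Int) (hs : t.Pairwise (· ≤ ·)) :
    ∀ d lo hi, hi - lo ≤ d → lo ≤ hi → hi ≤ t.length →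
      (∀ k, k < lo → t.getD k 0 < x) → (∀ k, hi ≤ k → k < t.length → x ≤ t.getD k 0) →
      bsearch t x lo hi ≤ t.length ∧
      (∀ k, k < bsearch t x lo hi → t.getD k 0 < x) ∧
      (∀ k, bsearch t x lo hi ≤ k → k < t.length → x ≤ t.getD k 0) := by
  intro d
  induction d with
  | zero =>
    intro lo hi hd hlohi hlen hbelow habove
    have : lo = hi := by omega
    subst this
    rw [bsearch, dif_neg (by omega)]
    exact ⟨by omega, hbelow, fun k hk hk' => habove k hk hk'⟩
  | succ d ih =>
    intro lo hi hd hlohi hlen hbelow habove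
    by_cases hlt : lo < hi
    · rw [bsearch, dif_pos hlt]
      simp only [PySem.List.pyGetD_natCast]
      have hmidlo : lo ≤ (lo + hi) / 2 := by omega
      have hmidhi : (lo + hi) / 2 < hi := by omega
      by_cases hcmp : t.getD ((lo + hi) / 2) 0 < x
      · rw [if_pos hcmp]
        exact ih ((lo + hi) / 2 + 1) hi (by omega) (by omega) hlen
          (fun k hk => lt_of_le_of_lt (getD_mono hs (show k ≤ (lo + hi) / 2 by omega)
            (show (lo + hi) / 2 < t.length by omega)) hcmp)
          habove
      · rw [if_neg hcmp]
        exact ih lo ((lo + hi) / 2) (by omega) (by omega) (by omega) hbelow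
          (fun k hk hk' => le_trans (not_lt.mp hcmp) (getD_mono hs hk hk'))
    · rw [bsearch, dif_neg hlt]
      have : lo = hi := by omega
      exact ⟨by omega, hbelow, fun k hk hk' => habove k (this ▸ hk) hk'⟩

-- invariant of the patience scan over the processed prefix q of the heights
def PatInv (q tails : List Int) : Prop :=
  tails.Pairwise (· ≤ ·) ∧
  (∀ k, k < tails.length → ∃ l, (l ++ [tails.getD k 0]).Sublist q ∧
      (l ++ [tails.getD k 0]).Pairwise (· < ·) ∧ l.length = k) ∧
  (∀ l v, (l ++ [v]).Sublist q → (l ++ [v]).Pairwise (· < ·) →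
      l.length < tails.length ∧ tails.getD l.length 0 ≤ v)

lemma getD_set_self {t : List Int} {i : Nat} {x : Int} (h : i < t.length) :
    (t.set i x).getD i 0 = x := by
  rw [List.getD_eq_getElem?_getD, List.getElem?_set_self h]; rfl

lemma getD_set_ne {t : List Int} {i k : Nat} {x : Int} (h : i ≠ k) :
    (t.set i x).getD k 0 = t.getD k 0 := by
  rw [List.getD_eq_getElem?_getD, List.getElem?_set_ne h, ← List.getD_eq_getElem?_getD]

lemma getD_append_left {t u : List Int} {k : Nat} (h : k < t.length) :
    (t ++ u).getD k 0 = t.getD k 0 := by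
  rw [List.getD_eq_getElem?_getD, List.getElem?_append_left h, ← List.getD_eq_getElem?_getD]

lemma getD_concat_self (t : List Int) (x : Int) : (t ++ [x]).getD t.length 0 = x := by
  rw [List.getD_eq_getElem?_getD, List.getElem?_concat_length]; rfl

lemma chain_snoc {l : List Int} {w x : Int} (hpw : (l ++ [w]).Pairwise (· < ·)) (hwx : w < x) :
    ((l ++ [w]) ++ [x]).Pairwise (· < ·) := by
  rw [List.pairwise_append]
  refine ⟨hpw, List.pairwise_singleton _ _, ?_⟩
  intro a ha b hb
  rw [List.mem_singleton] at hb; subst hb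
  rcases List.mem_append.mp ha with ha' | ha'
  · exact lt_trans ((List.pairwise_append.mp hpw).2.2 a ha' w (List.mem_singleton_self w)) hwx
  · rw [List.mem_singleton] at ha'; subst ha'; exact hwx

lemma snoc_sublist_snoc {l : List Int} {v x : Int} {q : List Int}
    (h : (l ++ [v]).Sublist (q ++ [x])) :
    (l ++ [v]).Sublist q ∨ (v = x ∧ l.Sublist q) := by
  rcases List.sublist_append_iff.mp h with ⟨t1, t2, heq, ht1, ht2⟩
  rcases List.sublist_singleton.mp ht2 with rfl | rfl
  · rw [List.append_nil] at heq
    exact Or.inl (heq ▸ ht1)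
  · obtain ⟨rfl, hv⟩ := List.append_inj' heq rfl
    rw [List.cons.injEq] at hv
    exact Or.inr ⟨hv.1, ht1⟩

lemma pstep_inv {q t : List Int} (h : PatInv q t) (x : Int) : PatInv (q ++ [x]) (pstep t x) := by
  obtain ⟨hsort, hwit, hub⟩ := h
  obtain ⟨hlo_le, hbelow, habove⟩ := bsearch_spec t x hsort t.length 0 t.length
    (by omega) (by omega) (le_refl _)
    (fun k hk => absurd hk (Nat.not_lt_zero k))
    (fun k hk hk' => absurd (lt_of_le_of_lt hk hk') (lt_irrefl _))
  unfold pstep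
  by_cases hcase : bsearch t x 0 t.length = t.length
  · rw [if_pos hcase]
    rw [hcase] at hbelow
    refine ⟨?_, ?_, ?_⟩
    · -- sortedness of t ++ [x]
      rw [List.pairwise_append]
      refine ⟨hsort, List.pairwise_singleton _ _, ?_⟩
      intro a ha b hb
      rw [List.mem_singleton] at hb; subst hb
      obtain ⟨k, hk, rfl⟩ := List.mem_iff_getElem.mp ha
      have := hbelow k hk
      rw [List.getD_eq_getElem t 0 hk] at this
      exact le_of_lt this
    · -- witnesses
      intro k hk
      rw [List.length_append, List.length_singleton] at hk
      by_cases hkt : k < t.length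
      · obtain ⟨l, hl1, hl2, hl3⟩ := hwit k hkt
        rw [getD_append_left hkt]
        exact ⟨l, hl1.trans (List.sublist_append_left q [x]), hl2, hl3⟩
      · have hk' : k = t.length := by omega
        subst hk'
        rw [getD_concat_self]
        by_cases ht0 : t.length = 0
        · refine ⟨[], ?_, by simp, by simp [ht0]⟩
          simp
        · obtain ⟨l, hl1, hl2, hl3⟩ := hwit (t.length - 1) (by omega)
          have hwx : t.getD (t.length - 1) 0 < x := hbelow _ (by omega)
          refine ⟨l ++ [t.getD (t.length - 1) 0],
            List.Sublist.append hl1 (List.Sublist.refl [x]),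
            chain_snoc hl2 hwx, by simp [hl3]; omega⟩
    · -- upper bound
      intro l v hsub hpw
      rcases snoc_sublist_snoc hsub with hsub' | ⟨rfl, hlq⟩
      · obtain ⟨hlen, hle⟩ := hub l v hsub' hpw
        refine ⟨by simp; omega, ?_⟩
        rw [getD_append_left hlen]
        exact hle
      · rcases List.eq_nil_or_concat l with rfl | ⟨l₀, w', rfl⟩
        · refine ⟨by simp, ?_⟩
          by_cases ht0 : t.length = 0
          · rw [List.length_eq_zero_iff.mp ht0]; simp
          · simp only [List.length_nil]
            rw [getD_append_left (by omega)]
            exact le_of_lt (hbelow 0 (by omega))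
        · rw [List.concat_eq_append] at *
          obtain ⟨hlen, hle⟩ := hub l₀ w' hlq (hpw.sublist (List.sublist_append_left _ _))
          refine ⟨by simp; omega, ?_⟩
          by_cases hend : l₀.length + 1 = t.length
          · simp only [List.length_append, List.length_singleton]
            rw [hend, getD_concat_self]
          · simp only [List.length_append, List.length_singleton]
            rw [getD_append_left (by omega)]
            exact le_of_lt (hbelow _ (by omega))
  · rw [if_neg hcase]
    rw [PySem.List.pySetD_natCast]
    have hlo_lt : bsearch t x 0 t.length < t.length := by omega
    set lo := bsearch t x 0 t.length with hlo
    have hx_le : x ≤ t.getD lo 0 := habove lo (le_refl _) hlo_lt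
    refine ⟨?_, ?_, ?_⟩
    · -- sortedness of t.set lo x
      rw [List.pairwise_iff_getElem]
      intro i j hi hj hij
      rw [List.length_set] at hi hj
      rw [List.getElem_set, List.getElem_set]
      by_cases hilo : lo = i
      · subst hilo
        rw [if_pos rfl, if_neg (by omega)]
        calc x ≤ t.getD lo 0 := hx_le
          _ ≤ t.getD j 0 := getD_mono hsort (by omega) hj
          _ = t[j] := List.getD_eq_getElem t 0 hj
      · rw [if_neg hilo]
        by_cases hjlo : lo = j
        · subst hjlo
          rw [if_pos rfl, ← List.getD_eq_getElem t 0 hi]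
          exact le_of_lt (hbelow i (by omega))
        · rw [if_neg hjlo]
          exact List.pairwise_iff_getElem.mp hsort i j hi hj hij
    · -- witnesses
      intro k hk
      rw [List.length_set] at hk
      by_cases hklo : k = lo
      · subst hklo
        rw [getD_set_self hlo_lt]
        by_cases hk0 : lo = 0
        · rw [hk0]
          refine ⟨[], ?_, by simp, rfl⟩
          simp
        · obtain ⟨l, hl1, hl2, hl3⟩ := hwit (lo - 1) (by omega)
          have hwx : t.getD (lo - 1) 0 < x := hbelow _ (by omega)
          refine ⟨l ++ [t.getD (lo - 1) 0],
            List.Sublist.append hl1 (List.Sublist.refl [x]),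
            chain_snoc hl2 hwx, by simp [hl3]; omega⟩
      · obtain ⟨l, hl1, hl2, hl3⟩ := hwit k hk
        rw [getD_set_ne (fun he => hklo he.symm)]
        exact ⟨l, hl1.trans (List.sublist_append_left q [x]), hl2, hl3⟩
    · -- upper bound
      intro l v hsub hpw
      rcases snoc_sublist_snoc hsub with hsub' | ⟨rfl, hlq⟩
      · obtain ⟨hlen, hle⟩ := hub l v hsub' hpw
        refine ⟨by rw [List.length_set]; exact hlen, ?_⟩
        by_cases hllo : l.length = lo
        · rw [hllo, getD_set_self hlo_lt]
          exact le_trans hx_le (hllo ▸ hle)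
        · rw [getD_set_ne (fun he => hllo he.symm)]
          exact hle
      · rcases List.eq_nil_or_concat l with rfl | ⟨l₀, w', rfl⟩
        · refine ⟨by rw [List.length_set]; simp; omega, ?_⟩
          simp only [List.length_nil]
          by_cases hlo0 : lo = 0
          · have h0 : (t.set lo v).getD 0 0 = v := by rw [← hlo0]; exact getD_set_self hlo_lt
            exact le_of_eq h0
          · rw [getD_set_ne hlo0]
            exact le_of_lt (hbelow 0 (by omega))
        · rw [List.concat_eq_append] at *
          obtain ⟨hlen, hle⟩ := hub l₀ w' hlq (hpw.sublist (List.sublist_append_left _ _))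
          have hw'x : w' < v := (List.pairwise_append.mp hpw).2.2 w'
            (List.mem_append_right l₀ (List.mem_singleton_self w')) _ (List.mem_singleton_self _)
          have hl₀lo : l₀.length < lo := by
            by_contra hcon
            have h1 : v ≤ t.getD l₀.length 0 :=
              le_trans hx_le (getD_mono hsort (by omega) hlen)
            omega
          refine ⟨by rw [List.length_set]; simp; omega, ?_⟩
          simp only [List.length_append, List.length_singleton]
          by_cases hend : l₀.length + 1 = lo
          · rw [hend, getD_set_self hlo_lt]
          · rw [getD_set_ne (fun he => hend he.symm)]
            exact le_of_lt (hbelow _ (by omega))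

lemma patience (q : List Int) : PatInv q (q.foldl pstep []) := by
  induction q using List.reverseRecOn with
  | nil =>
    refine ⟨List.Pairwise.nil, ?_, ?_⟩
    · intro k hk; simp at hk
    · intro l v h _; simp at h
  | append_singleton q x ih =>
    rw [List.foldl_append, List.foldl_cons, List.foldl_nil]
    exact pstep_inv ih x

lemma B_is_MaxChain (xs : List (List Int)) (hpre : Pre_grootste_stapel_hoogte xs) :
    MaxChain xs (grootste_stapel_hoogte_alt xs) := by
  obtain ⟨hne, _⟩ := hpre
  have hB : grootste_stapel_hoogte_alt xs =
      ((((PySem.List.sorted2 xs (fun e => PySem.List.pyGetD e 0 0)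
          (fun e => -(PySem.List.pyGetD e 1 0)) false).foldl
        (fun tails e => pstep tails (PySem.List.pyGetD e 1 0)) []).length : Int)) := rfl
  rw [hB]
  set env := PySem.List.sorted2 xs (fun e => PySem.List.pyGetD e 0 0)
      (fun e => -(PySem.List.pyGetD e 1 0)) false with henv
  have hperm : env.Perm xs :=
    PySem.List.sorted2_perm xs (fun e => PySem.List.pyGetD e 0 0)
      (fun e => -(PySem.List.pyGetD e 1 0)) false
  have hkey : env.Pairwise (fun a b => PySem.List.pyGetD a 0 0 < PySem.List.pyGetD b 0 0 ∨
      (PySem.List.pyGetD a 0 0 = PySem.List.pyGetD b 0 0 ∧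
        -(PySem.List.pyGetD a 1 0) ≤ -(PySem.List.pyGetD b 1 0))) :=
    henv ▸ sortedB_pairwise xs _ _
  have hfold : env.foldl (fun tails e => pstep tails (PySem.List.pyGetD e 1 0)) [] =
      (env.map (fun e => PySem.List.pyGetD e 1 0)).foldl pstep [] := by
    rw [List.foldl_map]
  rw [hfold]
  set q := env.map (fun e => PySem.List.pyGetD e 1 0) with hq
  obtain ⟨hsorted, hwit, hub⟩ := patience q
  set T := q.foldl pstep [] with hT
  have henvne : env ≠ [] := by
    intro h
    have := hperm.length_eq
    rw [h] at this
    exact hne (List.length_eq_zero_iff.mp this.symm)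
  have hTpos : 0 < T.length := by
    cases hq' : q with
    | nil =>
      exfalso
      rw [hq] at hq'
      exact henvne (List.map_eq_nil_iff.mp hq')
    | cons c q' =>
      have h0 := (hub [] c (by rw [hq']; simp) (by simp)).1
      simpa using h0
  constructor
  · -- existence
    obtain ⟨l, hl1, hl2, hl3⟩ := hwit (T.length - 1) (by omega)
    obtain ⟨L, hLsub, hLmap⟩ := List.sublist_map_iff.mp hl1
    have hLlen : L.length = T.length := by
      have hc := congrArg List.length hLmap
      rw [List.length_append, List.length_singleton, List.length_map, hl3] at hc
      omega
    refine ⟨L, ?_, ?_, hLsub.subperm.trans hperm.subperm, by rw [hLlen]⟩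
    · intro h
      rw [h] at hLlen
      simp at hLlen
      omega
    · -- L is pairwise fits
      have hkeyL := List.Pairwise.sublist hLsub hkey
      have hhgtL : L.Pairwise
          (fun a b => PySem.List.pyGetD a 1 0 < PySem.List.pyGetD b 1 0) := by
        rw [hLmap] at hl2
        exact List.pairwise_map.mp hl2
      refine (hkeyL.and hhgtL).imp ?_
      intro a b hab
      rw [fits_iff]
      rcases hab with ⟨hk | ⟨heq, hneg⟩, hh⟩
      · exact ⟨hk, hh⟩
      · omega
  · -- upper bound
    intro l hlne hlpw hlsub
    have hsub2 : l.Subperm env := hlsub.trans hperm.symm.subperm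
    have hl' : l.Pairwise (fun x y : List Int =>
        ¬ (PySem.List.pyGetD y 0 0 < PySem.List.pyGetD x 0 0 ∨
          (PySem.List.pyGetD y 0 0 = PySem.List.pyGetD x 0 0 ∧
            -(PySem.List.pyGetD y 1 0) ≤ -(PySem.List.pyGetD x 1 0)))) := by
      refine hlpw.imp ?_
      intro a b hf
      rw [fits_iff] at hf
      omega
    have hsl : l.Sublist env := chain_subperm_sublist _ env l hkey hl' hsub2
    have hmap : (l.map (fun e => PySem.List.pyGetD e 1 0)).Sublist q := hq ▸ hsl.map _
    rcases List.eq_nil_or_concat l with rfl | ⟨l₀, f, rfl⟩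
    · exact absurd rfl hlne
    rw [List.concat_eq_append] at *
    have hmap' : ((l₀.map (fun e => PySem.List.pyGetD e 1 0)) ++
        [PySem.List.pyGetD f 1 0]).Sublist q := by
      simpa using hmap
    have hpw' : ((l₀.map (fun e => PySem.List.pyGetD e 1 0)) ++
        [PySem.List.pyGetD f 1 0]).Pairwise (· < ·) := by
      have h0 : (l₀ ++ [f]).Pairwise
          (fun a b => PySem.List.pyGetD a 1 0 < PySem.List.pyGetD b 1 0) := by
        refine hlpw.imp ?_
        intro a b hf
        rw [fits_iff] at hf
        exact hf.2
      have h1 : ((l₀ ++ [f]).map (fun e => PySem.List.pyGetD e 1 0)).Pairwise (· < ·) :=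
        List.pairwise_map.mpr h0
      simpa using h1
    have hlt := (hub _ _ hmap' hpw').1
    rw [List.length_map] at hlt
    rw [List.length_append, List.length_singleton]
    push_cast
    omega

-- ===== VERDICT (by name: the statement is the Claim_ definition above) =====
theorem grootste_stapel_hoogte_spec : Claim_equal_grootste_stapel_hoogte := by
  intro xs _hdom hpre
  unfold Spec_grootste_stapel_hoogte
  exact MaxChain_unique (A_is_MaxChain xs hpre) (B_is_MaxChain xs hpre)
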